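-- pv_equiv track=rewrite | github.com/lgellersen/AoC24 | 7/7.1.py | possibleResults
-- ===== SOURCE A (Python) =====
-- def possibleResults(numbers):
--     if len(numbers) > 2:
--         res1 = []
--         res2 = []
--         res1.append(numbers[0] + numbers[1])
--         res1.extend(numbers[2:])
--         res2.append(numbers[0] * numbers[1])
--         res2.extend(numbers[2:])
--         done1 = possibleResults(res1)
--         done2 = possibleResults(res2)
--         done1.extend(done2)
--         return done1
--     else:
--         return [numbers[0]+numbers[1],numbers[0]*numbers[1]]
-- ===== SOURCE B (Python) =====
-- def possibleResults(numbers):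
--     res = [numbers[0] + numbers[1], numbers[0] * numbers[1]]
--     for n in numbers[2:]:
--         res = [y for x in res for y in (x + n, x * n)]
--     return res
-- ===== Notes on version B (the rewrite author's own statement) =====
-- stated objective: simpler
-- what changed: Replaces the branching front-reducing recursion (two copies of the tail rebuilt at every call) with a single forward fold that keeps the list of all partial results and expands it once per remaining number.
-- outside the precondition, e.g. on possibleResults([]): A raises IndexError, B raises IndexError; on possibleResults([0]): A raises IndexError, B raises IndexError; on possibleResults([1]): A raises IndexError, B raises IndexError
import Mathlib
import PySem

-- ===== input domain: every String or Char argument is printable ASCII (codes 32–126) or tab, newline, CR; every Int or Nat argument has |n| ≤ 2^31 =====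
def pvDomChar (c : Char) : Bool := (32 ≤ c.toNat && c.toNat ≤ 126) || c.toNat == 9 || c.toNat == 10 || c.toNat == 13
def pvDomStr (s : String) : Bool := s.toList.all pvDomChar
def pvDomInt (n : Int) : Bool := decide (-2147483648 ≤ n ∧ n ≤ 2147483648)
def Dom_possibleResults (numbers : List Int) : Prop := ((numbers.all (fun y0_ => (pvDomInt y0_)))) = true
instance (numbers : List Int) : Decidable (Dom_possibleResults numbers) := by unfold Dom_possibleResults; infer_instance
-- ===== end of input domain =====

-- B replaces A's branching front-reducing recursion with a single forward fold over the tail (same results, same order); objective: simpler.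


-- ===== PORT A =====
-- numbers[0]/numbers[1] raise IndexError when length < 2; those inputs are excluded by
-- Pre_ below, so the port reads them with getD 0 (the default is never reached on Pre_).
def possibleResults (numbers : List Int) : List Int :=
  if h : numbers.length > 2 then
    let res1 := (numbers.getD 0 0 + numbers.getD 1 0) :: numbers.drop 2
    let res2 := (numbers.getD 0 0 * numbers.getD 1 0) :: numbers.drop 2
    possibleResults res1 ++ possibleResults res2
  else
    [numbers.getD 0 0 + numbers.getD 1 0, numbers.getD 0 0 * numbers.getD 1 0]
termination_by numbers.length
decreasing_by
  · simp [List.length_drop]; omega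
  · simp [List.length_drop]; omega

-- ===== PORT B =====
def possibleResults_alt (numbers : List Int) : List Int :=
  (numbers.drop 2).foldl
    (fun res n => res.flatMap (fun x => [x + n, x * n]))
    [numbers.getD 0 0 + numbers.getD 1 0, numbers.getD 0 0 * numbers.getD 1 0]

-- ===== PRECONDITION & SPEC =====
-- Pre_ excludes lists of length < 2, on which A (and B) raise IndexError at numbers[0]/numbers[1].
def Pre_possibleResults (numbers : List Int) : Prop := 2 ≤ numbers.length
instance (numbers : List Int) : Decidable (Pre_possibleResults numbers) := by
  unfold Pre_possibleResults; infer_instance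

def pvWitness_possibleResults : List Int := [1, 2, 3]

def Spec_possibleResults (numbers : List Int) (out : List Int) : Prop := out = possibleResults_alt numbers
instance (numbers : List Int) (out : List Int) : Decidable (Spec_possibleResults numbers out) := by unfold Spec_possibleResults; infer_instance

-- ===== CLAIM (what is proved, stated in full; the proofs are below) =====
def Claim_equal_possibleResults : Prop := ∀ (numbers : List Int), Dom_possibleResults numbers → Pre_possibleResults numbers → Spec_possibleResults numbers (possibleResults numbers)

-- ===== LEMMAS AND PROOFS =====

-- the fold's step distributes over ++
theorem foldl_step_append (rs : List Int) (l1 l2 : List Int) :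
    rs.foldl (fun res n => res.flatMap (fun x => [x + n, x * n])) (l1 ++ l2)
      = rs.foldl (fun res n => res.flatMap (fun x => [x + n, x * n])) l1
        ++ rs.foldl (fun res n => res.flatMap (fun x => [x + n, x * n])) l2 := by
  induction rs generalizing l1 l2 with
  | nil => rfl
  | cons c rs ih =>
      simp only [List.foldl_cons, List.flatMap_append]
      exact ih _ _

-- A's recursion computes the fold
theorem possibleResults_eq_foldl (rest : List Int) : ∀ (a b : Int),
    possibleResults (a :: b :: rest)
      = rest.foldl (fun res n => res.flatMap (fun x => [x + n, x * n])) [a + b, a * b] := by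
  induction rest with
  | nil => intro a b; simp [possibleResults]
  | cons c rs ih =>
      intro a b
      rw [possibleResults]
      rw [dif_pos (by simp)]
      show possibleResults ((a + b) :: c :: rs) ++ possibleResults ((a * b) :: c :: rs) = _
      rw [ih (a + b) c, ih (a * b) c, ← foldl_step_append]
      simp [List.foldl_cons, List.flatMap]

-- ===== VERDICT (by name: the statement is the Claim_ definition above) =====
theorem possibleResults_spec : Claim_equal_possibleResults := by
  intro numbers _ hpre
  match numbers, hpre with
  | a :: b :: rest, _ =>
      show possibleResults (a :: b :: rest) = possibleResults_alt (a :: b :: rest)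
      rw [possibleResults_eq_foldl]
      rfl
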